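-- pv_equiv track=rewrite | github.com/vladizotov/s-pro-academy | Python_Intermediate_w3/word_utils.py | clear_sentence_from_punctuation_marks
-- ===== SOURCE A (Python) =====
-- def clear_sentence_from_punctuation_marks(sentence):
--     punctuation_marks = [".", ",", ":", ";", "(", ")", "!", "?", "-", "«", "»"]
--
--     counter = 0
--     while counter < len(punctuation_marks):
--         sentence = sentence.replace(punctuation_marks[counter], '')
--         counter += 1
--
--     if sentence.find('  ') != -1:
--         sentence = sentence.replace('  ', ' ')
--
--     return sentence
-- ===== SOURCE B (Python) =====
-- def clear_sentence_from_punctuation_marks(sentence):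
--     marks = {".", ",", ":", ";", "(", ")", "!", "?", "-", "«", "»"}
--     result = ''.join(c for c in sentence if c not in marks)
--     if result.find('  ') != -1:
--         result = result.replace('  ', ' ')
--     return result
-- ===== Notes on version B (the rewrite author's own statement) =====
-- stated objective: simpler
-- what changed: Replaces eleven repeated full-string replace passes with a single character-filtering pass using set membership, keeping A's single non-overlapping double-space collapse verbatim.
import Mathlib
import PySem

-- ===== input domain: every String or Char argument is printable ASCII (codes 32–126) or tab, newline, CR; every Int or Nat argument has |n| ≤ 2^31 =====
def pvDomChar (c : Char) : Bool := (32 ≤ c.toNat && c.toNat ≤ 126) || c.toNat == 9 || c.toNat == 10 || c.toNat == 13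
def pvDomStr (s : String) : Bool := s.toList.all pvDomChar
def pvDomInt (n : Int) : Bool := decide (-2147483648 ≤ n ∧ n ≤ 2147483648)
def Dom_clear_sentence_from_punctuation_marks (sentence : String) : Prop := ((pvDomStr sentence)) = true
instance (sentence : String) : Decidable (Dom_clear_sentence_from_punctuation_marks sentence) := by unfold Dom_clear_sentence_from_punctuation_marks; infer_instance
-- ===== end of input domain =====

-- B builds the cleaned string in one character-filtering pass over a mark set instead of eleven
-- full-string replace passes (simpler; no speed claim), keeping A's single non-overlapping
-- double-space collapse.


-- ===== PORT A =====
-- while counter < len(punctuation_marks): sentence = sentence.replace(punctuation_marks[counter], '')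
-- ported as the fold over the same list in the same order
def clear_sentence_from_punctuation_marks (sentence : String) : String :=
  let punctuation_marks : List String := [".", ",", ":", ";", "(", ")", "!", "?", "-", "«", "»"]
  let sentence := punctuation_marks.foldl (fun s m => PySem.Str.replace s m "") sentence
  if PySem.Str.find sentence "  " ≠ -1 then PySem.Str.replace sentence "  " " " else sentence

-- ===== PORT B =====
def clear_sentence_from_punctuation_marks_alt (sentence : String) : String :=
  let marks : List Char := ['.', ',', ':', ';', '(', ')', '!', '?', '-', '«', '»']
  let result := String.ofList (sentence.toList.filter (fun c => !(marks.contains c)))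
  if PySem.Str.find result "  " ≠ -1 then PySem.Str.replace result "  " " " else result

-- ===== PRECONDITION & SPEC =====
def Spec_clear_sentence_from_punctuation_marks (sentence : String) (out : String) : Prop := out = clear_sentence_from_punctuation_marks_alt sentence
instance (sentence : String) (out : String) : Decidable (Spec_clear_sentence_from_punctuation_marks sentence out) := by unfold Spec_clear_sentence_from_punctuation_marks; infer_instance

-- ===== CLAIM (what is proved, stated in full; the proofs are below) =====
def Claim_equal_clear_sentence_from_punctuation_marks : Prop := ∀ (sentence : String), Dom_clear_sentence_from_punctuation_marks sentence → Spec_clear_sentence_from_punctuation_marks sentence (clear_sentence_from_punctuation_marks sentence)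

-- ===== LEMMAS AND PROOFS =====
-- replace.go with a single-char needle and empty replacement removes exactly that char
theorem pv_go_single (c : Char) : ∀ (l : List Char) (fuel : Nat) (acc : List Char), l.length ≤ fuel →
    PySem.Chars.replace.go [c] [] fuel l acc = acc.reverse ++ l.filter (· ≠ c) := by
  intro l
  induction l with
  | nil => intro fuel acc _; cases fuel <;> simp [PySem.Chars.replace.go]
  | cons x t ih =>
    intro fuel acc h
    cases fuel with
    | zero => simp at h
    | succ f =>
      simp only [PySem.Chars.replace.go]
      by_cases hx : x = c
      · simp [hx, List.isPrefixOf, List.filter, ih f acc (by simpa using h)]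
      · simp [List.isPrefixOf, hx, Ne.symm hx, List.filter, ih f (x :: acc) (by simpa using h)]

-- s.replace(c, '') for a single character c is the filter dropping c
theorem pv_replace_single_empty (s : List Char) (c : Char) :
    PySem.Chars.replace s [c] [] = s.filter (· ≠ c) := by
  simp [PySem.Chars.replace, pv_go_single c s s.length [] le_rfl]

-- the eleven successive replace passes equal B's one filtering pass
theorem pv_key (sentence : String) :
    ([".", ",", ":", ";", "(", ")", "!", "?", "-", "«", "»"] : List String).foldl
      (fun s m => PySem.Str.replace s m "") sentence
    = String.ofList (sentence.toList.filter (fun c =>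
        !((['.', ',', ':', ';', '(', ')', '!', '?', '-', '«', '»'] : List Char).contains c))) := by
  apply String.toList_inj.mp
  simp only [List.foldl]
  simp [PySem.Str.toList_replace, pv_replace_single_empty, List.filter_filter, String.toList_ofList]
  apply List.filter_congr
  intro c _
  ac_rfl

-- ===== VERDICT (by name: the statement is the Claim_ definition above) =====
theorem clear_sentence_from_punctuation_marks_spec : Claim_equal_clear_sentence_from_punctuation_marks := by
  intro sentence _
  show _ = _
  simp only [clear_sentence_from_punctuation_marks, clear_sentence_from_punctuation_marks_alt]
  rw [pv_key]
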